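-- pv_equiv track=rewrite | github.com/vuanhtuan1012/CS101 | CS101_04.py | favorite_song
-- ===== SOURCE A (Python) =====
-- def favorite_song(songs, votes):
--     counters = []
--     # khoi tao mang counters
--     for bai_hat in songs:
--         counters.append(0)
--
--     # dem so binh chon cua tung bai hat
--     # luu vao mang counters
--     for bai_hat in votes:
--         index = 0
--         # tim index cua bai hat trong mang songs
--         while index < len(songs):
--             if songs[index] == bai_hat:
--                 counters[index] += 1
--                 break
--             index += 1
--
--     # tim index cua so lon nhat trong mang counters
--     index = 0
--     sln = counters[0]
--     index_sln = 0
--     while index < len(counters):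
--         if sln < counters[index]:
--             sln = counters[index]
--             index_sln = index
--         index += 1
--     return songs[index_sln]
-- ===== SOURCE B (Python) =====
-- def favorite_song(songs, votes):
--     best_i = 0
--     best_count = votes.count(songs[0])
--     for i in range(1, len(songs)):
--         c = votes.count(songs[i])
--         if best_count < c:
--             best_i, best_count = i, c
--     return songs[best_i]
-- ===== Notes on version B (the rewrite author's own statement) =====
-- stated objective: simpler
-- what changed: Drops A's counters table, its per-vote linear search loop and its separate argmax scan; B is a single argmax pass over songs that recounts each song's votes with list.count and keeps the earliest maximum.
import Mathlib
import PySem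

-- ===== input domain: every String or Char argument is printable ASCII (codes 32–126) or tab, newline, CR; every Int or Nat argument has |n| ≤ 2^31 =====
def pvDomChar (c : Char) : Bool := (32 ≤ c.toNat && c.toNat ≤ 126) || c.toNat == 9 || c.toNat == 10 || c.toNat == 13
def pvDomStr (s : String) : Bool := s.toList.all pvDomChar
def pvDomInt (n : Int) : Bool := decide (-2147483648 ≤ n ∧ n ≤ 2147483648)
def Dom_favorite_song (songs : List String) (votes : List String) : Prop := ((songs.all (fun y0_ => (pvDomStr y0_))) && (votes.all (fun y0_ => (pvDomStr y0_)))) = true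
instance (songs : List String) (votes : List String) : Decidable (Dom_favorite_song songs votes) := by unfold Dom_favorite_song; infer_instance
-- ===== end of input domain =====

-- B replaces A's counters table + per-vote linear search + separate argmax scan by one
-- argmax pass over songs using list.count (objective: simpler; not claimed faster).

-- ===== PORT A =====
-- while loop of A's vote-counting phase: find the first index ≥ index with songs[index] == v and bump it
def pvFind (songs : List String) (v : String) (counters : List Int) (index : Nat) : List Int :=
  if index < songs.length then
    if songs.getD index "" == v then counters.set index (counters.getD index 0 + 1)
    else pvFind songs v counters (index + 1)
  else counters
termination_by songs.length - index

-- A's final while loop: argmax scan over counters (strict <, earliest kept)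
def pvScan (counters : List Int) (index : Nat) (sln : Int) (index_sln : Nat) : Nat :=
  if index < counters.length then
    if sln < counters.getD index 0 then pvScan counters (index + 1) (counters.getD index 0) index
    else pvScan counters (index + 1) sln index_sln
  else index_sln
termination_by counters.length - index

def favorite_song (songs : List String) (votes : List String) : String :=
  let counters0 := songs.foldl (fun acc _ => acc ++ [(0 : Int)]) []
  let counters := votes.foldl (fun cs v => pvFind songs v cs 0) counters0
  -- counters[0] raises IndexError when songs = [] (excluded by Pre_); getD's default is junk there
  let sln := counters.getD 0 0
  songs.getD (pvScan counters 0 sln 0) ""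

-- ===== PORT B =====
def favorite_song_alt (songs : List String) (votes : List String) : String :=
  -- songs[0] raises IndexError when songs = [] (excluded by Pre_)
  let best := (List.range' 1 (songs.length - 1)).foldl
    (fun (b : Nat × Int) i =>
      let c : Int := PySem.List.count votes (songs.getD i "")
      if b.2 < c then (i, c) else b)
    (0, (PySem.List.count votes (songs.getD 0 "") : Int))
  songs.getD best.1 ""

-- ===== PRECONDITION & SPEC =====
-- Pre_ excludes only songs = [], where both A (counters[0]) and B (songs[0]) raise IndexError.
def Pre_favorite_song (songs : List String) (votes : List String) : Prop := songs ≠ []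
instance (songs : List String) (votes : List String) : Decidable (Pre_favorite_song songs votes) := by unfold Pre_favorite_song; infer_instance
def pvWitness_favorite_song : List String × List String := (["a", "b"], ["b", "b", "a"])

def Spec_favorite_song (songs : List String) (votes : List String) (out : String) : Prop := out = favorite_song_alt songs votes
instance (songs : List String) (votes : List String) (out : String) : Decidable (Spec_favorite_song songs votes out) := by unfold Spec_favorite_song; infer_instance

-- ===== CLAIM (what is proved, stated in full; the proofs are below) =====
def Claim_equal_favorite_song : Prop := ∀ (songs : List String) (votes : List String), Dom_favorite_song songs votes → Pre_favorite_song songs votes → Spec_favorite_song songs votes (favorite_song songs votes)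

-- ===== LEMMAS AND PROOFS =====
-- number of votes for songs[i]
def pvW (songs votes : List String) (i : Nat) : Int := (PySem.List.count votes (songs.getD i "") : Int)

lemma pvW_nonneg (songs votes : List String) (i : Nat) : 0 ≤ pvW songs votes i := by
  simp [pvW]

lemma pvFind_length (songs : List String) (v : String) (counters : List Int) (index : Nat) :
    (pvFind songs v counters index).length = counters.length := by
  fun_induction pvFind <;> simp_all

lemma pvFind_getD (songs : List String) (v : String) (counters : List Int) (index : Nat)
    (hlen : counters.length = songs.length) (i : Nat) :
    (pvFind songs v counters index).getD i 0 =
      counters.getD i 0 +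
        (if index ≤ i ∧ i < songs.length ∧ songs.getD i "" = v ∧
            (∀ j < i, index ≤ j → songs.getD j "" ≠ v) then 1 else 0) := by
  fun_induction pvFind songs v counters index with
  | case1 index hlt hbeq =>
    have hv : songs.getD index "" = v := by simpa using hbeq
    by_cases hi : i = index
    · subst hi
      rw [List.getD_eq_getElem?_getD, List.getElem?_set_self (by omega), List.getD_eq_getElem?_getD]
      rw [if_pos ⟨Nat.le_refl i, hlt, hv, fun j hj hij => absurd hij (by omega)⟩]
      simp
    · rw [List.getD_eq_getElem?_getD, List.getElem?_set_ne (by omega), ← List.getD_eq_getElem?_getD]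
      rw [if_neg ?_]
      · ring
      · rintro ⟨h1, h2, h3, h4⟩
        have : index < i := by omega
        exact h4 index this (Nat.le_refl index) hv
  | case2 index hlt hbeq ih =>
    have hv : songs.getD index "" ≠ v := by simpa using hbeq
    rw [ih]
    congr 1
    refine if_congr ?_ rfl rfl
    constructor
    · rintro ⟨h1, h2, h3, h4⟩
      refine ⟨by omega, h2, h3, fun j hj hij => ?_⟩
      by_cases hje : j = index
      · exact hje ▸ hv
      · exact h4 j hj (by omega)
    · rintro ⟨h1, h2, h3, h4⟩
      have hne : i ≠ index := fun h => hv (h ▸ h3)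
      exact ⟨by omega, h2, h3, fun j hj hij => h4 j hj (by omega)⟩
  | case3 index hge =>
    rw [if_neg ?_]
    · ring
    · rintro ⟨h1, h2, _, _⟩
      exact hge (by omega)

-- k = 0 specialisation
lemma pvFind_getD0 (songs : List String) (v : String) (counters : List Int)
    (hlen : counters.length = songs.length) (i : Nat) :
    (pvFind songs v counters 0).getD i 0 =
      counters.getD i 0 +
        (if i < songs.length ∧ songs.getD i "" = v ∧
            (∀ j < i, songs.getD j "" ≠ v) then 1 else 0) := by
  rw [pvFind_getD songs v counters 0 hlen i]
  congr 1
  refine if_congr ?_ rfl rfl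
  constructor
  · rintro ⟨_, h1, h2, h3⟩; exact ⟨h1, h2, fun j hj => h3 j hj (Nat.zero_le j)⟩
  · rintro ⟨h1, h2, h3⟩; exact ⟨Nat.zero_le i, h1, h2, fun j hj _ => h3 j hj⟩

lemma foldl_pvFind_length (songs votes : List String) (counters : List Int) :
    (votes.foldl (fun cs v => pvFind songs v cs 0) counters).length = counters.length := by
  induction votes generalizing counters with
  | nil => rfl
  | cons v vs ih => simp [List.foldl_cons, ih, pvFind_length]

lemma foldl_pvFind_getD (songs votes : List String) (counters : List Int)
    (hlen : counters.length = songs.length) (i : Nat) :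
    (votes.foldl (fun cs v => pvFind songs v cs 0) counters).getD i 0 =
      counters.getD i 0 +
        (votes.countP (fun v => decide (i < songs.length ∧ songs.getD i "" = v ∧
            (∀ j < i, songs.getD j "" ≠ v))) : Int) := by
  induction votes generalizing counters with
  | nil => simp
  | cons v vs ih =>
    rw [List.foldl_cons, ih _ (by rw [pvFind_length]; exact hlen),
        pvFind_getD0 songs v counters hlen i, List.countP_cons]
    by_cases h : (i < songs.length ∧ songs.getD i "" = v ∧ ∀ j < i, songs.getD j "" ≠ v)
    · rw [if_pos h, decide_eq_true h]
      simp only [if_true]; push_cast; ring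
    · rw [if_neg h, decide_eq_false h]
      norm_num

-- the counters array A builds: full count at a first occurrence, 0 at a duplicate
lemma map_zero_getD (l : List String) (i : Nat) :
    (l.foldl (fun acc _ => acc ++ [(0 : Int)]) []).getD i 0 = 0 := by
  rw [PySem.List.foldl_append_singleton_eq_map, List.nil_append]
  rw [List.getD_eq_getElem?_getD, List.getElem?_map]
  cases l[i]? <;> simp

lemma counters_char (songs votes : List String) (i : Nat) (hi : i < songs.length) :
    (votes.foldl (fun cs v => pvFind songs v cs 0)
        (songs.foldl (fun acc _ => acc ++ [(0 : Int)]) [])).getD i 0 =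
      if (∀ j < i, songs.getD j "" ≠ songs.getD i "") then pvW songs votes i else 0 := by
  rw [foldl_pvFind_getD songs votes _ (by rw [PySem.List.foldl_append_singleton_eq_map]; simp) i,
      map_zero_getD]
  by_cases hfo : ∀ j < i, songs.getD j "" ≠ songs.getD i ""
  · rw [if_pos hfo]
    have hcp : (votes.countP (fun v => decide (i < songs.length ∧ songs.getD i "" = v ∧
        ∀ j < i, songs.getD j "" ≠ v))) = PySem.List.count votes (songs.getD i "") := by
      rw [PySem.List.count_eq, List.count]
      refine List.countP_congr (fun v hv => ?_)
      by_cases hveq : v = songs.getD i ""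
      · subst hveq
        exact iff_of_true (decide_eq_true ⟨hi, rfl, hfo⟩) (beq_self_eq_true _)
      · exact iff_of_false (fun h => hveq (of_decide_eq_true h).2.1.symm)
          (fun h => hveq (eq_of_beq h))
    rw [hcp, pvW, Int.zero_add]
  · rw [if_neg hfo]
    have hcp : (votes.countP (fun v => decide (i < songs.length ∧ songs.getD i "" = v ∧
        ∀ j < i, songs.getD j "" ≠ v))) = 0 := by
      refine List.countP_eq_zero.mpr (fun v hv h => ?_)
      obtain ⟨-, h2, h3⟩ := of_decide_eq_true h
      exact hfo (fun j hj => h2 ▸ h3 j hj)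
    rw [hcp]
    rfl

lemma counters_length (songs votes : List String) :
    (votes.foldl (fun cs v => pvFind songs v cs 0)
        (songs.foldl (fun acc _ => acc ++ [(0 : Int)]) [])).length = songs.length := by
  rw [foldl_pvFind_length, PySem.List.foldl_append_singleton_eq_map]
  simp

lemma scan_eq (songs votes : List String)
    (counters : List Int)
    (hc : counters = votes.foldl (fun cs v => pvFind songs v cs 0)
        (songs.foldl (fun acc _ => acc ++ [(0 : Int)]) []))
    (m k : Nat) (sln : Int) (idx : Nat)
    (hm : m = songs.length - k) (hk : 1 ≤ k)
    (hinv : ∀ j < k, pvW songs votes j ≤ sln) :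
    pvScan counters k sln idx =
      ((List.range' k (songs.length - k)).foldl
        (fun (b : Nat × Int) i =>
          if b.2 < pvW songs votes i then (i, pvW songs votes i) else b) (idx, sln)).1 := by
  induction m generalizing k sln idx with
  | zero =>
    have hkn : songs.length ≤ k := by omega
    rw [pvScan, if_neg (by rw [hc, counters_length]; omega), Nat.sub_eq_zero_of_le hkn]
    simp
  | succ m ih =>
    have hkn : k < songs.length := by omega
    have hkc : k < counters.length := by rw [hc, counters_length]; omega
    have hgetD : counters.getD k 0 =
        if (∀ j < k, songs.getD j "" ≠ songs.getD k "") then pvW songs votes k else 0 := by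
      rw [hc]; exact counters_char songs votes k hkn
    rw [show songs.length - k = m + 1 by omega, List.range'_succ, List.foldl_cons,
        pvScan, if_pos hkc, hgetD]
    by_cases hfo : ∀ j < k, songs.getD j "" ≠ songs.getD k ""
    · rw [if_pos hfo]
      by_cases hlt : sln < pvW songs votes k
      · rw [if_pos hlt, if_pos hlt,
            show m = songs.length - (k + 1) by omega]
        refine ih (k + 1) _ k (by omega) (by omega) (fun j hj => ?_)
        rcases Nat.lt_or_ge j k with h | h
        · exact le_of_lt (lt_of_le_of_lt (hinv j h) hlt)
        · have : j = k := by omega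
          exact this ▸ le_refl _
      · rw [if_neg hlt, if_neg hlt,
            show m = songs.length - (k + 1) by omega]
        refine ih (k + 1) _ idx (by omega) (by omega) (fun j hj => ?_)
        rcases Nat.lt_or_ge j k with h | h
        · exact hinv j h
        · have : j = k := by omega
          exact this ▸ le_of_not_gt hlt
    · rw [if_neg hfo]
      have hfo' : ∃ j, j < k ∧ songs.getD j "" = songs.getD k "" := by
        by_contra hcon
        exact hfo fun j hj hjeq => hcon ⟨j, hj, hjeq⟩
      obtain ⟨j0, hj0, heq⟩ := hfo'
      have hwk : pvW songs votes k = pvW songs votes j0 := by rw [pvW, pvW, heq]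
      have hle : pvW songs votes k ≤ sln := hwk ▸ hinv j0 hj0
      have h0 : 0 ≤ sln := le_trans (pvW_nonneg songs votes 0) (hinv 0 (by omega))
      rw [if_neg (not_lt.mpr h0), if_neg (not_lt.mpr hle),
          show m = songs.length - (k + 1) by omega]
      refine ih (k + 1) _ idx (by omega) (by omega) (fun j hj => ?_)
      rcases Nat.lt_or_ge j k with h | h
      · exact hinv j h
      · have : j = k := by omega
        exact this ▸ hle

-- ===== VERDICT (by name: the statement is the Claim_ definition above) =====
theorem favorite_song_spec : Claim_equal_favorite_song := by
  intro songs votes _ hpre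
  have hne : songs ≠ [] := hpre
  have hn : 0 < songs.length := List.length_pos_of_ne_nil hne
  show favorite_song songs votes = favorite_song_alt songs votes
  simp only [favorite_song, favorite_song_alt]
  have hchar0 : (votes.foldl (fun cs v => pvFind songs v cs 0)
      (songs.foldl (fun acc _ => acc ++ [(0 : Int)]) [])).getD 0 0 = pvW songs votes 0 := by
    rw [counters_char songs votes 0 hn, if_pos (fun j hj => absurd hj (Nat.not_lt_zero j))]
  rw [pvScan, if_pos (by rw [counters_length]; omega), if_neg (lt_irrefl _)]
  rw [scan_eq songs votes _ rfl (songs.length - 1) 1 _ 0 rfl (le_refl 1)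
      (fun j hj => by
        have : j = 0 := by omega
        rw [this, hchar0])]
  rw [hchar0]
  rfl
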